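-- pv_equiv track=rewrite | github.com/phatakshaunak/scaler_academy | DSA/Intro_Hashing/perfect_cards.py | solve
-- ===== SOURCE A (Python) =====
-- def solve(A):
--
--     '''To win the game, you need two distinct numbers to be present in the array and in equal frequency. In all other cases, the game
--        is lost'''
--
--     freq = {}
--
--     for i in A:
--
--         if i not in freq:
--             freq[i] = 1
--         else:
--             freq[i] += 1
--
--     if len(freq) != 2:
--         return "LOSE"
--
--     elif len(freq) == 2:
--         val = list(freq.values())
--         if val[0] == val[1]:
--             return "WIN"
--         else:
--             return "LOSE"
-- ===== SOURCE B (Python) =====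
-- def solve(A):
--     n = len(A)
--     if n < 2 or n % 2 != 0:
--         return "LOSE"
--     S = sorted(A)
--     if S[0] != S[-1] and S[0] == S[n // 2 - 1] and S[n // 2] == S[-1]:
--         return "WIN"
--     return "LOSE"
-- ===== Notes on version B (the rewrite author's own statement) =====
-- stated objective: alternative
-- what changed: Replaces A's frequency-dictionary pass and value comparison by sorting the list and checking with four comparisons that it splits at the middle into two uniform, distinct halves.
import Mathlib
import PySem

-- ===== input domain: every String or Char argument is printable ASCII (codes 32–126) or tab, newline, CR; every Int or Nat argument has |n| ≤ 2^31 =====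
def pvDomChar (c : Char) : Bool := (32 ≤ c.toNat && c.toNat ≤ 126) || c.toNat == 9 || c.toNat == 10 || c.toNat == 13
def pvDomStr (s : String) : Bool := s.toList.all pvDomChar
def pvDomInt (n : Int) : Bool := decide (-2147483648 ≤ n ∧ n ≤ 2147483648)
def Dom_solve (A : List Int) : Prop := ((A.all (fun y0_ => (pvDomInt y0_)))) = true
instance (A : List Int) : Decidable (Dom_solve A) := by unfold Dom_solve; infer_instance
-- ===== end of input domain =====

-- B replaces A's frequency-dictionary pass by a sort: after sorting, "exactly two distinct
-- values, equally frequent" is four comparisons at the ends and middle of the sorted list.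

-- ===== PORT A =====
def solve (A : List Int) : String :=
  let freq := A.foldl (fun d i =>
    if ¬ (d.contains i = true) then d.insert i 1 else d.modify i 0 (· + 1))
    (PySem.Dict.empty : PySem.Dict Int Int)
  if freq.size ≠ 2 then "LOSE"
  else
    let val := freq.values
    if PySem.List.pyGetD val 0 0 = PySem.List.pyGetD val 1 0 then "WIN" else "LOSE"

-- ===== PORT B =====
def solve_alt (A : List Int) : String :=
  let n : Int := PySem.List.len A
  if n < 2 ∨ PySem.Int.mod n 2 ≠ 0 then "LOSE"
  else
    let S := PySem.List.sorted A (fun x => x) false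
    if PySem.List.pyGetD S 0 0 ≠ PySem.List.pyGetD S (-1) 0 ∧
       PySem.List.pyGetD S 0 0 = PySem.List.pyGetD S (PySem.Int.floordiv n 2 - 1) 0 ∧
       PySem.List.pyGetD S (PySem.Int.floordiv n 2) 0 = PySem.List.pyGetD S (-1) 0
    then "WIN" else "LOSE"

-- ===== PRECONDITION & SPEC =====
def Spec_solve (A : List Int) (out : String) : Prop := out = solve_alt A
instance (A : List Int) (out : String) : Decidable (Spec_solve A out) := by unfold Spec_solve; infer_instance

-- ===== CLAIM (what is proved, stated in full; the proofs are below) =====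
def Claim_equal_solve : Prop := ∀ (A : List Int), Dom_solve A → Spec_solve A (solve A)

-- ===== LEMMAS AND PROOFS =====

-- A's counting loop is Counter(A)
theorem solve_freq_eq (A : List Int) :
    A.foldl (fun d i =>
      if ¬ (d.contains i = true) then d.insert i 1 else d.modify i 0 (· + 1))
      (PySem.Dict.empty : PySem.Dict Int Int) = PySem.Dict.counter A := by
  rw [PySem.Dict.counter_eq_foldl]
  congr 1
  funext d i
  by_cases h : d.contains i = true
  · simp [h]
  · rw [Bool.not_eq_true] at h
    simp [h, PySem.Dict.modify, PySem.Dict.getD_of_not_contains]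

theorem solve_of_len_ne2 (A : List Int) (h : (PySem.Set.ofList A).length ≠ 2) :
    solve A = "LOSE" := by
  simp only [solve, solve_freq_eq]
  rw [if_pos]
  simp [PySem.Dict.size, PySem.Dict.items_counter, h]

theorem solve_of_two (A : List Int) (x y : Int) (h : PySem.Set.ofList A = [x, y]) :
    solve A = if A.count x = A.count y then "WIN" else "LOSE" := by
  simp only [solve, solve_freq_eq]
  rw [if_neg (by simp [PySem.Dict.size, PySem.Dict.items_counter, h])]
  have hv : (PySem.Dict.counter A).values = [(A.count x : Int), (A.count y : Int)] := by
    simp [PySem.Dict.values, PySem.Dict.items_counter, h]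
  simp only [hv]
  simp [PySem.List.pyGetD]

-- a list containing exactly the two distinct values x, y is a permutation of two blocks
theorem perm_two (A : List Int) (x y : Int) (hxy : x ≠ y)
    (hmem : ∀ v ∈ A, v = x ∨ v = y) :
    A.Perm (List.replicate (A.count x) x ++ List.replicate (A.count y) y) := by
  rw [List.perm_iff_count]
  intro v
  by_cases hvx : v = x
  · subst hvx; simp [List.count_append, List.count_replicate, Ne.symm hxy]
  · by_cases hvy : v = y
    · subst hvy; simp [List.count_append, List.count_replicate, hxy]
    · have : v ∉ A := fun hv => by rcases hmem v hv with h | h <;> simp_all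
      simp [List.count_append, List.count_replicate, Ne.symm hvx, Ne.symm hvy,
            List.count_eq_zero_of_not_mem this]

theorem rr_getElem (a b : Int) (ca cb k : Nat) (h : k < ca + cb) :
    (List.replicate ca a ++ List.replicate cb b)[k]'(by simp; omega)
      = if k < ca then a else b := by
  by_cases hk : k < ca
  · rw [List.getElem_append_left (by simpa using hk)]; simp [hk]
  · rw [List.getElem_append_right (by simpa using hk)]; simp [hk]

theorem rr_pyGetD (a b : Int) (ca cb k : Nat) (h : k < ca + cb) :
    PySem.List.pyGetD (List.replicate ca a ++ List.replicate cb b) (k : Int) 0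
      = if k < ca then a else b := by
  rw [PySem.List.pyGetD_eq_getElem _ 0 (by omega) (by simp; exact_mod_cast h)]
  simp only [Int.toNat_natCast]
  exact rr_getElem a b ca cb k h

theorem rr_pyGetD_neg1 (a b : Int) (ca cb : Nat) (hcb : 0 < cb) :
    PySem.List.pyGetD (List.replicate ca a ++ List.replicate cb b) (-1) 0 = b := by
  rw [PySem.List.pyGetD_neg_ofNat _ 1 0 (by omega) (by simp; omega)]
  simp only [List.length_append, List.length_replicate]
  rw [rr_getElem a b ca cb (ca + cb - 1) (by omega)]
  rw [if_neg (by omega)]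

theorem sorted_two (A : List Int) (a b : Int) (hab : a ≤ b) (ca cb : Nat)
    (hperm : A.Perm (List.replicate ca a ++ List.replicate cb b)) :
    PySem.List.sorted A (fun x => x) false = List.replicate ca a ++ List.replicate cb b := by
  apply PySem.List.sorted_id_eq_of_perm_of_pairwise _ _ hperm.symm
  rw [List.pairwise_append]
  refine ⟨List.pairwise_replicate.2 (Or.inr le_rfl), List.pairwise_replicate.2 (Or.inr le_rfl), ?_⟩
  intro u hu v hv
  simp only [List.mem_replicate] at hu hv
  omega

theorem natmod_int (n : Nat) : PySem.Int.mod (n : Int) 2 = ((n % 2 : Nat) : Int) := by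
  exact_mod_cast PySem.Int.mod_natCast n 2

theorem alt_short (A : List Int) (h : A.length < 2 ∨ A.length % 2 = 1) : solve_alt A = "LOSE" := by
  simp only [solve_alt, PySem.List.len_eq]
  rw [if_pos]
  rcases h with h | h
  · left; exact_mod_cast Nat.cast_lt.2 h
  · right; rw [natmod_int, h]; decide

theorem alt_const (A : List Int) (x : Int) (hne : A ≠ []) (hx : ∀ a ∈ A, a = x) :
    solve_alt A = "LOSE" := by
  simp only [solve_alt, PySem.List.len_eq]
  by_cases hshort : ((A.length : Int) < 2 ∨ PySem.Int.mod (A.length) 2 ≠ 0)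
  · rw [if_pos hshort]
  · rw [if_neg hshort]
    rw [if_neg]
    intro ⟨h1, _, _⟩
    apply h1
    set S := PySem.List.sorted A (fun x => x) false with hS
    have hSne : S ≠ [] := by
      simp [hS, PySem.List.sorted_eq_nil_iff, hne]
    have hmem : ∀ a ∈ S, a = x := by
      intro a ha; exact hx a ((PySem.List.mem_sorted _ _ _ _).1 ha)
    rw [PySem.List.pyGetD_zero, PySem.List.pyGetD_neg_one S 0 hSne]
    rcases S with _ | ⟨s, t⟩
    · simp at hSne
    · rw [List.getD_cons_zero]
      have := hmem _ (List.getLast_mem hSne)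
      rw [this, hmem s (by simp)]

theorem alt_two (A : List Int) (a b : Int) (hab : a < b)
    (hmem : ∀ v ∈ A, v = a ∨ v = b) (ha : a ∈ A) (hb : b ∈ A) :
    solve_alt A = if A.count a = A.count b then "WIN" else "LOSE" := by
  have hperm := perm_two A a b (ne_of_lt hab) hmem
  have hcap : 0 < A.count a := List.count_pos_iff.2 ha
  have hcbp : 0 < A.count b := List.count_pos_iff.2 hb
  have hlen : A.length = A.count a + A.count b := by
    have := hperm.length_eq; simpa using this
  have hS := sorted_two A a b (le_of_lt hab) _ _ hperm
  simp only [solve_alt, PySem.List.len_eq]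
  by_cases hodd : A.length % 2 = 1
  · rw [if_pos (Or.inr (by rw [natmod_int, hodd]; decide))]
    rw [if_neg (by omega)]
  · have heven : A.length % 2 = 0 := by omega
    rw [if_neg (by
      rw [natmod_int, heven]
      push Not
      exact ⟨by exact_mod_cast (by omega : 2 ≤ A.length), by decide⟩)]
    have hfd : PySem.Int.floordiv (A.length : Int) 2 = ((A.length / 2 : Nat) : Int) := by
      exact_mod_cast PySem.Int.floordiv_natCast A.length 2
    have hm1 : 1 ≤ A.length / 2 := by omega
    have e0 : PySem.List.pyGetD (List.replicate (A.count a) a ++ List.replicate (A.count b) b) 0 0 = a := by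
      have := rr_pyGetD a b (A.count a) (A.count b) 0 (by omega)
      simpa [hcap] using this
    have e1 := rr_pyGetD_neg1 a b (A.count a) (A.count b) hcbp
    have e2 := rr_pyGetD a b (A.count a) (A.count b) (A.length / 2 - 1) (by omega)
    have e3 := rr_pyGetD a b (A.count a) (A.count b) (A.length / 2) (by omega)
    simp only [hS, hfd, show ((A.length / 2 : Nat) : Int) - 1 = ((A.length / 2 - 1 : Nat) : Int) by omega,
      e0, e1, e2, e3]
    by_cases hcab : A.count a = A.count b
    · rw [if_pos hcab, if_pos]
      refine ⟨ne_of_lt hab, ?_, ?_⟩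
      · rw [if_pos (by omega)]
      · rw [if_neg (by omega)]
    · rw [if_neg hcab, if_neg]
      intro ⟨h1, h2, h3⟩
      by_cases hlt : A.length / 2 - 1 < A.count a
      · rw [if_pos hlt] at h2
        by_cases hlt2 : A.length / 2 < A.count a
        · rw [if_pos hlt2] at h3; exact (ne_of_lt hab) h3
        · omega
      · rw [if_neg hlt] at h2; exact (ne_of_lt hab) h2

-- B's middle-split test forces every element to equal one of the two ends of the sorted list
theorem sorted_mem_two (A : List Int) (h2 : 2 ≤ A.length)
    (hc : PySem.List.pyGetD (PySem.List.sorted A (fun x => x) false) 0 0 ≠ PySem.List.pyGetD (PySem.List.sorted A (fun x => x) false) (-1) 0 ∧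
          PySem.List.pyGetD (PySem.List.sorted A (fun x => x) false) 0 0 = PySem.List.pyGetD (PySem.List.sorted A (fun x => x) false) ((((A.length / 2 : Nat)) : Int) - 1) 0 ∧
          PySem.List.pyGetD (PySem.List.sorted A (fun x => x) false) (((A.length / 2 : Nat)) : Int) 0 = PySem.List.pyGetD (PySem.List.sorted A (fun x => x) false) (-1) 0) :
    ∀ v ∈ A, v = PySem.List.pyGetD (PySem.List.sorted A (fun x => x) false) 0 0 ∨
             v = PySem.List.pyGetD (PySem.List.sorted A (fun x => x) false) (-1) 0 := by
  obtain ⟨h1, hmid1, hmid2⟩ := hc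
  intro v hv
  have hSlen : (PySem.List.sorted A (fun x => x) false).length = A.length :=
    PySem.List.length_sorted A _ _
  have hm1 : 1 ≤ A.length / 2 := by omega
  have hvS : v ∈ PySem.List.sorted A (fun x => x) false :=
    (PySem.List.mem_sorted A _ _ v).2 hv
  obtain ⟨j, hj, hjv⟩ := List.mem_iff_getElem.1 hvS
  have e0 : PySem.List.pyGetD (PySem.List.sorted A (fun x => x) false) 0 0
      = (PySem.List.sorted A (fun x => x) false)[0]'(by omega) := by
    rw [PySem.List.pyGetD_eq_getElem _ 0 (by omega) (by exact_mod_cast (by omega : 0 < (PySem.List.sorted A (fun x => x) false).length))]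
    simp only [Int.toNat_zero]
  have e1 : PySem.List.pyGetD (PySem.List.sorted A (fun x => x) false) (-1) 0
      = (PySem.List.sorted A (fun x => x) false)[(PySem.List.sorted A (fun x => x) false).length - 1]'(by omega) := by
    rw [PySem.List.pyGetD_neg_ofNat _ 1 0 (by omega) (by omega)]
  have e2 : PySem.List.pyGetD (PySem.List.sorted A (fun x => x) false) ((((A.length / 2 : Nat)) : Int) - 1) 0
      = (PySem.List.sorted A (fun x => x) false)[A.length / 2 - 1]'(by omega) := by
    rw [show (((A.length / 2 : Nat) : Int) - 1) = ((A.length / 2 - 1 : Nat) : Int) by omega]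
    rw [PySem.List.pyGetD_eq_getElem _ 0 (by omega) (by exact_mod_cast (by omega : A.length / 2 - 1 < (PySem.List.sorted A (fun x => x) false).length))]
    simp only [Int.toNat_natCast]
  have e3 : PySem.List.pyGetD (PySem.List.sorted A (fun x => x) false) (((A.length / 2 : Nat)) : Int) 0
      = (PySem.List.sorted A (fun x => x) false)[A.length / 2]'(by omega) := by
    rw [PySem.List.pyGetD_eq_getElem _ 0 (by omega) (by exact_mod_cast (by omega : A.length / 2 < (PySem.List.sorted A (fun x => x) false).length))]
    simp only [Int.toNat_natCast]
  rw [e0, e1] at h1 ⊢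
  rw [e0, e2] at hmid1
  rw [e3, e1] at hmid2
  by_cases hjm : j ≤ A.length / 2 - 1
  · left
    have hle1 : (PySem.List.sorted A (fun x => x) false)[0]'(by omega) ≤ (PySem.List.sorted A (fun x => x) false)[j]'(by omega) :=
      PySem.List.sorted_id_getElem_mono A (by omega) (by omega)
    have hle2 : (PySem.List.sorted A (fun x => x) false)[j]'(by omega) ≤ (PySem.List.sorted A (fun x => x) false)[A.length / 2 - 1]'(by omega) :=
      PySem.List.sorted_id_getElem_mono A (by omega) (by omega)
    rw [← hmid1] at hle2
    omega
  · right
    have hle1 : (PySem.List.sorted A (fun x => x) false)[A.length / 2]'(by omega) ≤ (PySem.List.sorted A (fun x => x) false)[j]'(by omega) :=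
      PySem.List.sorted_id_getElem_mono A (by omega) (by omega)
    have hle2 : (PySem.List.sorted A (fun x => x) false)[j]'(by omega) ≤ (PySem.List.sorted A (fun x => x) false)[(PySem.List.sorted A (fun x => x) false).length - 1]'(by omega) :=
      PySem.List.sorted_id_getElem_mono A (by omega) (by omega)
    rw [hmid2] at hle1
    omega

theorem alt_many (A : List Int) (x y z : Int) (hxy : x ≠ y) (hxz : x ≠ z) (hyz : y ≠ z)
    (hx : x ∈ A) (hy : y ∈ A) (hz : z ∈ A) : solve_alt A = "LOSE" := by
  simp only [solve_alt, PySem.List.len_eq]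
  by_cases hshort : ((A.length : Int) < 2 ∨ PySem.Int.mod (A.length) 2 ≠ 0)
  · rw [if_pos hshort]
  · rw [if_neg hshort]
    have h2 : 2 ≤ A.length := by
      rcases not_or.1 hshort with ⟨h, _⟩
      exact_mod_cast not_lt.1 h
    rw [if_neg]
    intro hc
    have hfd : PySem.Int.floordiv (A.length : Int) 2 = ((A.length / 2 : Nat) : Int) := by
      exact_mod_cast PySem.Int.floordiv_natCast A.length 2
    rw [hfd] at hc
    have htwo := sorted_mem_two A h2 hc
    rcases htwo x hx with h | h <;> rcases htwo y hy with h' | h' <;>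
      rcases htwo z hz with h'' | h'' <;> simp_all

-- ===== VERDICT (by name: the statement is the Claim_ definition above) =====
theorem solve_spec : Claim_equal_solve := by
  intro A _
  show solve A = solve_alt A
  have hnd := PySem.Set.nodup_ofList (xs := A)
  have hmem : ∀ v, v ∈ PySem.Set.ofList A ↔ v ∈ A := fun v => PySem.Set.mem_ofList A v
  rcases hD : PySem.Set.ofList A with _ | ⟨x, _ | ⟨y, _ | ⟨z, rest⟩⟩⟩
  · -- no distinct values: A = []
    have hA : A = [] := by
      rcases A with _ | ⟨a, t⟩
      · rfl
      · exfalso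
        have : a ∈ PySem.Set.ofList (a :: t) := (hmem a).2 (by simp)
        rw [hD] at this; simp at this
    rw [solve_of_len_ne2 A (by rw [hD]; decide), alt_short A (by rw [hA]; simp)]
  · -- one distinct value
    rw [hD] at hmem hnd
    have hx : x ∈ A := (hmem x).1 (by simp)
    rw [solve_of_len_ne2 A (by rw [hD]; simp)]
    rw [alt_const A x (by rintro rfl; simp at hx) (fun a ha => by simpa using (hmem a).2 ha)]
  · -- exactly two distinct values
    rw [hD] at hmem hnd
    have hxy : x ≠ y := by simp at hnd; exact hnd
    have hx : x ∈ A := (hmem x).1 (by simp)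
    have hy : y ∈ A := (hmem y).1 (by simp)
    have hall : ∀ v ∈ A, v = x ∨ v = y := fun v hv => by simpa using (hmem v).2 hv
    rw [solve_of_two A x y hD]
    rcases lt_or_gt_of_ne hxy with hlt | hgt
    · rw [alt_two A x y hlt hall hx hy]
    · rw [alt_two A y x hgt (fun v hv => (hall v hv).symm) hy hx]
      by_cases h : A.count x = A.count y
      · rw [if_pos h, if_pos h.symm]
      · rw [if_neg h, if_neg (fun hh => h hh.symm)]
  · -- three or more distinct values
    rw [hD] at hmem hnd
    have hx : x ∈ A := (hmem x).1 (by simp)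
    have hy : y ∈ A := (hmem y).1 (by simp)
    have hz : z ∈ A := (hmem z).1 (by simp)
    simp only [List.nodup_cons, List.mem_cons, not_or] at hnd
    rw [solve_of_len_ne2 A (by rw [hD]; simp)]
    rw [alt_many A x y z (by tauto) (by tauto) (by tauto) hx hy hz]
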